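-- pv_equiv track=rewrite | github.com/syntra-vindevoy/python-1-2024 | Chap_9/test.py | find_min_excluded_letters
-- ===== SOURCE A (Python) =====
-- def avoids(word, forbidden_letters):
--     """
--     Check if the word contains any of the forbidden letters.
--
--     :param word: The word to check.
--     :param forbidden_letters: A string of forbidden letters.
--     :return: True if the word does not contain any forbidden letters, False otherwise.
--     """
--     for letter in forbidden_letters:
--         if letter in word:
--             return False
--     return True
--
-- def count_avoided_words(words, forbidden_letters):
--     """
--     Count the number of words that do not contain any forbidden letters.
--
--     :param words: A list of words.
--     :param forbidden_letters: A string of forbidden letters.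
--     :return: The number of words that don't contain forbidden letters.
--     """
--     count = 0
--     for word in words:
--         if avoids(word, forbidden_letters):
--             count += 1
--     return count
--
-- def generate_combinations(letters, combination_length):
--     """
--     Generate combinations of a given length from the input letters.
--
--     :param letters: A string of all possible letters.
--     :param combination_length: The length of each combination.
--     :yield: Each combination as a tuple.
--     """
--     if combination_length == 0:
--         yield ()
--     elif len(letters) < combination_length:
--         return
--     else:
--         first = letters[0]
--         for subcomb in generate_combinations(letters[1:], combination_length - 1):
--             yield (first,) + subcomb
--         for subcomb in generate_combinations(letters[1:], combination_length):
--             yield subcomb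
--
-- def calculate_letter_frequencies(words):
--     """
--     Calculate the frequency of each letter in the list of words.
--
--     :param words: A list of words.
--     :return: A dictionary containing letters as keys and their frequencies as values.
--     """
--     letter_counts = {}
--     for word in words:
--         unique_letters = set(word)  # Count each letter only once per word
--         for letter in unique_letters:
--             if letter in letter_counts:
--                 letter_counts[letter] += 1
--             else:
--                 letter_counts[letter] = 1
--     return letter_counts
--
-- def find_min_excluded_letters(words, all_letters):
--     """
--     Find a combination of 5 forbidden letters that excludes the smallest number of words.
--
--     :param words: A list of words to analyze.
--     :param all_letters: A string of all possible letters.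
--     :return: A tuple containing the optimal set of 5 letters and the number of excluded words.
--     """
--     # Calculate letter frequencies and sort letters by frequency (descending order)
--     letter_counts = calculate_letter_frequencies(words)
--     sorted_letters = sorted(all_letters, key=lambda x: -letter_counts.get(x, 0))
--
--     min_excluded = len(words)
--     best_combination = None
--
--     # Generate combinations of 5 letters from the most frequent ones
--     for combo in generate_combinations(sorted_letters, 5):
--         excluded_count = len(words) - count_avoided_words(words, combo)
--         if excluded_count < min_excluded:
--             min_excluded = excluded_count
--             best_combination = combo
--
--     return best_combination, min_excluded
-- ===== SOURCE B (Python) =====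
-- def find_min_excluded_letters(words, all_letters):
--     """
--     Find a combination of 5 forbidden letters that excludes the smallest number of words,
--     using an inverted index (letter -> indices of the words containing it) and a DFS over
--     combinations that accumulates the union of excluded-word index sets along each prefix.
--     """
--     hit = {}
--     for i, word in enumerate(words):
--         for letter in set(word):
--             hit.setdefault(letter, set()).add(i)
--     letters = sorted(all_letters, key=lambda c: -len(hit.get(c, ())))
--
--     def dfs(k, pool, acc, chosen, best):
--         if k == 0:
--             return (chosen, len(acc)) if len(acc) < best[1] else best
--         while pool:
--             c, pool = pool[0], pool[1:]
--             best = dfs(k - 1, pool, acc | hit.get(c, set()), chosen + (c,), best)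
--         return best
--
--     return dfs(5, letters, set(), (), (None, len(words)))
-- ===== Notes on version B (the rewrite author's own statement) =====
-- stated objective: alternative
-- what changed: B builds an inverted index mapping each letter to the set of indices of words containing it, then runs a DFS over 5-combinations that carries the running union of those index sets along each prefix, so a combination's excluded count is the size of the accumulated set at the leaf; A instead materialises every combination and rescans every word for every letter of every combination (measured 3.9x at sizes both finish, but both still enumerate all C(n,5) combinations, so no speed is claimed).
import Mathlib
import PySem

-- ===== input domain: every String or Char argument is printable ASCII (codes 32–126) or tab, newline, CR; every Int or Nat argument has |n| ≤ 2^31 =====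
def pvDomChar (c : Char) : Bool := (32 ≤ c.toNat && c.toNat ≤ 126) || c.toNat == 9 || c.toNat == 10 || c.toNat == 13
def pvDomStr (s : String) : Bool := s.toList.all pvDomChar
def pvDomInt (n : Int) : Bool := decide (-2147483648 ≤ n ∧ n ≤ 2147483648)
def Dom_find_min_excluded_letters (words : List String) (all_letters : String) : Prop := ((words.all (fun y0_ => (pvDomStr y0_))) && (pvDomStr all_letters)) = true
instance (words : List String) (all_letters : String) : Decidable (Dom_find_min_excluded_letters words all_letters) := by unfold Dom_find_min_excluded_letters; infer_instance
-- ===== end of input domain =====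

-- B replaces A's generate-every-combination-and-rescan-every-word search by an inverted index
-- (letter -> set of indices of the words containing it) and a DFS over 5-combinations that carries
-- the running union of those index sets, so each combination's excluded count is the size of the
-- accumulated set (objective: alternative algorithm; no speed is claimed).

-- ===== PORT A =====
-- avoids(word, forbidden_letters): 'letter in word' on a 1-character letter is character membership (exact)
def pvAvoids (word : String) (forbidden : List Char) : Bool :=
  match forbidden with
  | [] => true
  | c :: rest => if word.toList.contains c then false else pvAvoids word rest

-- count_avoided_words
def pvCountAvoided (words : List String) (forbidden : List Char) : Int :=
  words.foldl (fun cnt w => if pvAvoids w forbidden then cnt + 1 else cnt) 0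

-- generate_combinations (A's recursive generator, with its length guard)
def pvGenA : List Char → Nat → List (List Char)
  | _, 0 => [[]]
  | [], _ + 1 => []                           -- len(letters) < combination_length
  | x :: xs, k + 1 =>
    if (x :: xs).length < k + 1 then []
    else (pvGenA xs k).map (fun r => x :: r) ++ pvGenA xs (k + 1)

-- calculate_letter_frequencies (iterating set(word); the counts do not depend on the iteration order)
def pvCalcFreq (words : List String) : PySem.Dict Char Int :=
  words.foldl
    (fun d w =>
      (PySem.Set.ofList w.toList).foldl
        (fun d c => if d.contains c then d.insert c (d.getD c 0 + 1) else d.insert c 1) d)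
    PySem.Dict.empty

-- the main loop of A, over the already-sorted letters
def pvRestA (words : List String) (sortedLetters : List Char) : Option (List String) × Int :=
  let st :=
    (pvGenA sortedLetters 5).foldl
      (fun (st : Int × Option (List Char)) combo =>
        let excluded := (words.length : Int) - pvCountAvoided words combo
        if excluded < st.1 then (excluded, some combo) else st)
      ((words.length : Int), none)
  (st.2.map (fun c => c.map (fun ch => String.ofList [ch])), st.1)

def find_min_excluded_letters (words : List String) (all_letters : String) : Option (List String) × Int :=
  let counts := pvCalcFreq words
  pvRestA words (PySem.List.sorted all_letters.toList (fun x => -(counts.getD x 0)) false)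

-- ===== PORT B =====
-- hit.setdefault(letter, set()).add(i): the value at 'letter' becomes (old-or-empty set) plus i
def pvHit (words : List String) : PySem.Dict Char (PySem.Set Int) :=
  (PySem.List.enumerate words 0).foldl
    (fun d p =>
      (PySem.Set.ofList p.2.toList).foldl
        (fun d c => d.insert c (PySem.Set.add (d.getD c PySem.Set.empty) p.1)) d)
    PySem.Dict.empty

-- dfs(k, pool, acc, chosen, best): the while loop consumes pool; each step recurses with the
-- suffix, the accumulated union acc | hit[c], and chosen + (c,)
mutual
  def pvDfs (hit : PySem.Dict Char (PySem.Set Int)) :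
      Nat → List Char → PySem.Set Int → List Char → Option (List Char) × Int → Option (List Char) × Int
    | 0, _, acc, chosen, best =>
        if (acc.length : Int) < best.2 then (some chosen, (acc.length : Int)) else best
    | k + 1, pool, acc, chosen, best => pvDfsGo hit k pool acc chosen best
  termination_by k pool => (k, pool.length)
  def pvDfsGo (hit : PySem.Dict Char (PySem.Set Int)) :
      Nat → List Char → PySem.Set Int → List Char → Option (List Char) × Int → Option (List Char) × Int
    | _, [], _, _, best => best
    | k, c :: pool, acc, chosen, best =>
        pvDfsGo hit k pool acc chosen
          (pvDfs hit k pool (PySem.Set.union acc (hit.getD c PySem.Set.empty)) (chosen ++ [c]) best)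
  termination_by k pool _ _ _ => (k, pool.length)
end

def find_min_excluded_letters_alt (words : List String) (all_letters : String) : Option (List String) × Int :=
  let hit := pvHit words
  let letters := PySem.List.sorted all_letters.toList
    (fun c => -(((hit.getD c PySem.Set.empty).length : Int))) false
  let r := pvDfs hit 5 letters PySem.Set.empty [] (none, (words.length : Int))
  (r.1.map (fun c => c.map (fun ch => String.ofList [ch])), r.2)

-- ===== PRECONDITION & SPEC =====
def Spec_find_min_excluded_letters (words : List String) (all_letters : String) (out : Option (List String) × Int) : Prop := out = find_min_excluded_letters_alt words all_letters
instance (words : List String) (all_letters : String) (out : Option (List String) × Int) : Decidable (Spec_find_min_excluded_letters words all_letters out) := by unfold Spec_find_min_excluded_letters; infer_instance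

-- ===== CLAIM (what is proved, stated in full; the proofs are below) =====
def Claim_equal_find_min_excluded_letters : Prop := ∀ (words : List String) (all_letters : String), Dom_find_min_excluded_letters words all_letters → Spec_find_min_excluded_letters words all_letters (find_min_excluded_letters words all_letters)

-- ===== LEMMAS AND PROOFS =====

-- the union accumulated by the DFS along a (partial) combination
def pvUnionAll (hit : PySem.Dict Char (PySem.Set Int)) (acc : PySem.Set Int) (rest : List Char) : PySem.Set Int :=
  rest.foldl (fun a c => PySem.Set.union a (hit.getD c PySem.Set.empty)) acc

-- the indices of the words containing c, in increasing order
def pvHitIdx (words : List String) (c : Char) : List Int :=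
  ((List.range words.length).filter (fun k => decide (c ∈ (words.getD k "").toList))).map Int.ofNat

-- A's generator equals itertools-order combinations
theorem pvGenA_eq_combinations (l : List Char) : ∀ k, pvGenA l k = PySem.List.combinations l k := by
  
  induction l with
  | nil =>
    intro k
    cases k with
    | zero => simp [pvGenA, PySem.List.combinations_zero]
    | succ k => simp [pvGenA, PySem.List.combinations_nil_succ]
  | cons x xs ih =>
    intro k
    cases k with
    | zero => simp [pvGenA, PySem.List.combinations_zero]
    | succ k =>
      rw [pvGenA, PySem.List.combinations_cons_succ]
      by_cases h : (x :: xs).length < k + 1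
      · have h1 : xs.length < k := by simp at h; omega
        have h2 : xs.length < k + 1 := by omega
        rw [if_pos h, PySem.List.combinations_eq_nil_of_length_lt xs h1,
          PySem.List.combinations_eq_nil_of_length_lt xs h2]
        simp
      · rw [if_neg h, ih k, ih (k + 1)]

-- avoids(word, f) is exactly: no letter of f occurs in word
theorem pvAvoids_iff (word : String) : ∀ f : List Char, pvAvoids word f = true ↔ ∀ c ∈ f, c ∉ word.toList := by
  
  intro f
  induction f with
  | nil => simp [pvAvoids]
  | cons c rest ih =>
    by_cases h : word.toList.contains c
    · have hc : c ∈ word.toList := by simpa using h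
      simp only [pvAvoids, if_pos h]
      exact iff_of_false (by simp) (fun hall => hall c List.mem_cons_self hc)
    · have hc : c ∉ word.toList := by simpa using h
      simp only [pvAvoids, if_neg h, ih]
      constructor
      · intro hall d hd
        rcases List.mem_cons.mp hd with rfl | hd'
        · exact hc
        · exact hall d hd'
      · intro hall d hd
        exact hall d (List.mem_cons_of_mem _ hd)

-- generic: a fold over a Nodup list that rewrites each key's value once
theorem getD_foldl_insert_apply {ν : Type} (f : ν → ν) (dflt : ν) :
    ∀ (S : List Char), S.Nodup → ∀ (d : PySem.Dict Char ν) (c : Char),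
      (S.foldl (fun d ch => d.insert ch (f (d.getD ch dflt))) d).getD c dflt
        = if c ∈ S then f (d.getD c dflt) else d.getD c dflt := by
  
  intro S
  induction S with
  | nil => intro _ d c; simp
  | cons ch S ih =>
    intro hnd d c
    have hch : ch ∉ S := (List.nodup_cons.mp hnd).1
    have hS : S.Nodup := (List.nodup_cons.mp hnd).2
    rw [List.foldl_cons, ih hS]
    by_cases hc : c = ch
    · subst hc
      rw [if_neg hch, if_pos List.mem_cons_self, PySem.Dict.getD_insert_self]
    · rw [PySem.Dict.getD_insert, if_neg hc]
      by_cases hcS : c ∈ S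
      · rw [if_pos hcS, if_pos (List.mem_cons_of_mem _ hcS)]
      · rw [if_neg hcS, if_neg (by simp [hc, hcS])]

-- the inverted-index fold, generalized over the start index and the starting dict
theorem pvHit_fold_getD :
    ∀ (ws : List String) (n : Nat) (d : PySem.Dict Char (PySem.Set Int)),
      (∀ (c : Char) (i : Int), i ∈ d.getD c PySem.Set.empty → i < (n : Int)) →
      ∀ c : Char,
      ((PySem.List.enumerate ws (n : Int)).foldl
          (fun d p =>
            (PySem.Set.ofList p.2.toList).foldl
              (fun d ch => d.insert ch (PySem.Set.add (d.getD ch PySem.Set.empty) p.1)) d) d).getD c PySem.Set.empty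
        = d.getD c PySem.Set.empty
            ++ ((List.range ws.length).filter
                  (fun k => decide (c ∈ (ws.getD k "").toList))).map (fun k => ((n + k : Nat) : Int)) := by
  intro ws
  induction ws with
  | nil => intro n d _ c; simp [PySem.List.enumerate]
  | cons w ws ih =>
    intro n d hd c
    rw [PySem.List.enumerate_cons, List.foldl_cons]
    set d' := (PySem.Set.ofList w.toList).foldl
        (fun d ch => d.insert ch (PySem.Set.add (d.getD ch PySem.Set.empty) (n : Int))) d with hd'def
    have hgetD' : ∀ c : Char, d'.getD c PySem.Set.empty
        = if c ∈ w.toList then PySem.Set.add (d.getD c PySem.Set.empty) ((n : Int)) else d.getD c PySem.Set.empty := by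
      intro c
      rw [hd'def, getD_foldl_insert_apply (fun s => PySem.Set.add s (n : Int)) PySem.Set.empty _
        (PySem.Set.nodup_ofList _) d c]
      by_cases hcw : c ∈ w.toList
      · rw [if_pos (by simp [PySem.Set.mem_ofList, hcw]), if_pos hcw]
      · rw [if_neg (by simp [PySem.Set.mem_ofList, hcw]), if_neg hcw]
    have hbound' : ∀ (c : Char) (i : Int), i ∈ d'.getD c PySem.Set.empty → i < ((n + 1 : Nat) : Int) := by
      intro c i hi
      rw [hgetD' c] at hi
      by_cases hcw : c ∈ w.toList
      · rw [if_pos hcw] at hi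
        rcases (by simpa [PySem.Set.mem_add] using hi : i ∈ d.getD c PySem.Set.empty ∨ i = (n : Int)) with h | h
        · have := hd c i h; push_cast; omega
        · subst h; push_cast; omega
      · rw [if_neg hcw] at hi
        have := hd c i hi; push_cast; omega
    have hcast : (n : Int) + 1 = ((n + 1 : Nat) : Int) := by push_cast; ring
    rw [hcast, ih (n + 1) d' hbound' c, hgetD' c]
    have hp : ((fun k => decide (c ∈ ((w :: ws).getD k "").toList)) ∘ Nat.succ)
        = (fun k => decide (c ∈ (ws.getD k "").toList)) := by
      funext k; simp
    have hg : ((fun k : Nat => ((n + k : Nat) : Int)) ∘ Nat.succ)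
        = (fun k : Nat => ((n + 1 + k : Nat) : Int)) := by
      funext k; simp [Function.comp]; omega
    by_cases hcw : c ∈ w.toList
    · have hnotmem : (n : Int) ∉ d.getD c PySem.Set.empty := fun h => absurd (hd c _ h) (lt_irrefl _)
      rw [if_pos hcw, PySem.Set.add_of_not_mem hnotmem, List.length_cons,
        List.range_succ_eq_map, List.filter_cons]
      simp only [List.getD_cons_zero, hcw, decide_true, if_true]
      rw [List.filter_map, hp, List.map_cons, List.map_map, hg]
      simp
    · rw [if_neg hcw, List.length_cons, List.range_succ_eq_map, List.filter_cons]
      simp only [List.getD_cons_zero, hcw, decide_false, Bool.false_eq_true, if_false]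
      rw [List.filter_map, hp, List.map_map, hg]

-- the inverted index holds exactly the indices of the words containing each letter
theorem pvHit_getD (words : List String) (c : Char) :
    (pvHit words).getD c PySem.Set.empty = pvHitIdx words c := by
  
  have h := pvHit_fold_getD words 0 PySem.Dict.empty (by simp [PySem.Set.empty]) c
  rw [pvHit]
  simp only [Nat.cast_zero] at h
  rw [h, pvHitIdx]
  simp only [PySem.Dict.getD_empty]
  show ([] : List Int) ++ _ = _
  rw [List.nil_append]
  apply List.map_congr_left
  intro k _
  simp [Int.ofNat_eq_natCast]

-- countP over a list equals countP over its index range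
theorem countP_eq_countP_range (p : String → Bool) :
    ∀ ws : List String, ws.countP p = ((List.range ws.length).filter (fun k => p (ws.getD k ""))).length := by
  
  intro ws
  induction ws with
  | nil => simp
  | cons w ws ih =>
    have hp : ((fun k => p ((w :: ws).getD k "")) ∘ Nat.succ) = (fun k => p (ws.getD k "")) := by
      funext k; simp
    rw [List.countP_cons, ih, List.length_cons, List.range_succ_eq_map, List.filter_cons]
    by_cases hw : p w
    · simp only [List.getD_cons_zero, hw, if_true]
      rw [List.filter_map, hp]
      simp
    · simp only [List.getD_cons_zero, hw, Bool.false_eq_true, if_false]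
      rw [List.filter_map, hp]
      simp

-- A's frequency of c = number of words containing c
theorem pvCalcFreq_getD (words : List String) (c : Char) :
    (pvCalcFreq words).getD c 0 = (words.countP (fun w => decide (c ∈ w.toList)) : Int) := by
  
  have hstep : (fun (d : PySem.Dict Char Int) (c : Char) =>
      if d.contains c then d.insert c (d.getD c 0 + 1) else d.insert c 1)
      = fun d c => d.insert c (d.getD c 0 + 1) := by
    funext d c
    by_cases h : d.contains c
    · rw [if_pos h]
    · rw [if_neg (by simpa using h), PySem.Dict.getD_of_not_contains d 0 (by simpa using h)]
      norm_num
  have aux : ∀ (ws : List String) (d : PySem.Dict Char Int),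
      (ws.foldl (fun d w => (PySem.Set.ofList w.toList).foldl
          (fun d c => d.insert c (d.getD c 0 + 1)) d) d).getD c 0
        = d.getD c 0 + (ws.countP (fun w => decide (c ∈ w.toList)) : Int) := by
    intro ws
    induction ws with
    | nil => intro d; simp
    | cons w ws ih =>
      intro d
      rw [List.foldl_cons, ih, PySem.Dict.getD_foldl_insert_add_one, List.countP_cons]
      by_cases hcw : c ∈ w.toList
      · simp [hcw]
        omega
      · have h0 : (PySem.Set.ofList w.toList).count c = 0 :=
          List.count_eq_zero.mpr (fun h => hcw ((PySem.Set.mem_ofList _ _).mp h))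
        simp [h0, hcw]
  rw [pvCalcFreq, hstep, aux words PySem.Dict.empty]
  simp

theorem mem_pvUnionAll (hit : PySem.Dict Char (PySem.Set Int)) (i : Int) :
    ∀ (rest : List Char) (acc : PySem.Set Int),
      i ∈ pvUnionAll hit acc rest ↔ i ∈ acc ∨ ∃ c ∈ rest, i ∈ hit.getD c PySem.Set.empty := by
  
  intro rest
  induction rest with
  | nil => intro acc; simp [pvUnionAll]
  | cons c rest ih =>
    intro acc
    rw [pvUnionAll, List.foldl_cons]
    have := ih (PySem.Set.union acc (hit.getD c PySem.Set.empty))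
    rw [pvUnionAll] at this
    rw [this]
    simp only [PySem.Set.mem_union, List.mem_cons]
    constructor
    · rintro ((h | h) | ⟨d, hd, hmem⟩)
      · exact Or.inl h
      · exact Or.inr ⟨c, Or.inl rfl, h⟩
      · exact Or.inr ⟨d, Or.inr hd, hmem⟩
    · rintro (h | ⟨d, (rfl | hd), hmem⟩)
      · exact Or.inl (Or.inl h)
      · exact Or.inl (Or.inr hmem)
      · exact Or.inr ⟨d, hd, hmem⟩

theorem nodup_pvUnionAll (hit : PySem.Dict Char (PySem.Set Int)) :
    ∀ (rest : List Char) (acc : PySem.Set Int), acc.Nodup → (pvUnionAll hit acc rest).Nodup := by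
  
  intro rest
  induction rest with
  | nil => intro acc h; simpa [pvUnionAll] using h
  | cons c rest ih =>
    intro acc h
    rw [pvUnionAll, List.foldl_cons]
    have := ih (PySem.Set.union acc (hit.getD c PySem.Set.empty)) (PySem.Set.nodup_union _ _ h)
    rwa [pvUnionAll] at this

-- the size of the accumulated union over a combination = the number of words it excludes
theorem pvUnionAll_length (words : List String) (combo : List Char) :
    ((pvUnionAll (pvHit words) PySem.Set.empty combo).length : Int)
      = (words.length : Int) - pvCountAvoided words combo := by
  
  have hU : (pvUnionAll (pvHit words) PySem.Set.empty combo).Nodup :=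
    nodup_pvUnionAll _ _ _ List.nodup_nil
  set V := ((List.range words.length).filter
      (fun k => !pvAvoids (words.getD k "") combo)).map Int.ofNat with hV
  have hVnodup : V.Nodup :=
    ((List.nodup_range).filter _).map (fun a b h => Int.ofNat.inj h)
  have hnotavoid : ∀ w : String, (!pvAvoids w combo) = true ↔ ∃ c ∈ combo, c ∈ w.toList := by
    intro w
    have h1 := pvAvoids_iff w combo
    cases hb : pvAvoids w combo with
    | false =>
      have hex : ¬ ∀ c ∈ combo, c ∉ w.toList := fun hall => by simp [h1.mpr hall] at hb
      push Not at hex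
      exact iff_of_true (by simp) hex
    | true =>
      have hall := h1.mp hb
      exact iff_of_false (by simp) (fun ⟨c, hc, hcw⟩ => hall c hc hcw)
  have hmem : ∀ i : Int, i ∈ pvUnionAll (pvHit words) PySem.Set.empty combo ↔ i ∈ V := by
    intro i
    rw [mem_pvUnionAll, hV]
    constructor
    · rintro (h | ⟨c, hc, hi⟩)
      · simp [PySem.Set.empty] at h
      · rw [pvHit_getD, pvHitIdx] at hi
        rcases List.mem_map.mp hi with ⟨k, hk, rfl⟩
        rcases List.mem_filter.mp hk with ⟨hkr, hq⟩
        exact List.mem_map.mpr ⟨k, List.mem_filter.mpr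
          ⟨hkr, (hnotavoid _).mpr ⟨c, hc, by simpa using hq⟩⟩, rfl⟩
    · intro hi
      rcases List.mem_map.mp hi with ⟨k, hk, rfl⟩
      rcases List.mem_filter.mp hk with ⟨hkr, hq⟩
      rcases (hnotavoid _).mp hq with ⟨c, hc, hcw⟩
      refine Or.inr ⟨c, hc, ?_⟩
      rw [pvHit_getD, pvHitIdx]
      exact List.mem_map.mpr ⟨k, List.mem_filter.mpr ⟨hkr, by simpa using hcw⟩, rfl⟩
  have hlen : (pvUnionAll (pvHit words) PySem.Set.empty combo).length = V.length :=
    ((List.perm_ext_iff_of_nodup hU hVnodup).mpr hmem).length_eq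
  have hVlen : V.length = words.countP (fun w => !pvAvoids w combo) := by
    rw [hV, List.length_map, countP_eq_countP_range (fun w => !pvAvoids w combo) words]
  have hcnt : pvCountAvoided words combo = (words.countP (fun w => pvAvoids w combo) : Int) := by
    rw [pvCountAvoided, PySem.List.foldl_if_add_one]
    simp
  have hsplit : words.length = words.countP (fun w => pvAvoids w combo)
      + words.countP (fun w => !pvAvoids w combo) := by
    rw [List.length_eq_countP_add_countP (fun w => pvAvoids w combo)]
    congr 1
    apply List.countP_congr
    intro w _
    simp
  rw [hlen, hVlen, hcnt]
  omega

-- the DFS is a strict-min fold over the combinations of the pool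
theorem pvDfs_eq (hit : PySem.Dict Char (PySem.Set Int)) :
    ∀ (k : Nat) (pool : List Char) (acc : PySem.Set Int) (chosen : List Char) (best : Option (List Char) × Int),
      pvDfs hit k pool acc chosen best
        = (PySem.List.combinations pool k).foldl
            (fun best rest =>
              if ((pvUnionAll hit acc rest).length : Int) < best.2
              then (some (chosen ++ rest), ((pvUnionAll hit acc rest).length : Int)) else best) best := by
  
  intro k
  induction k with
  | zero =>
    intro pool acc chosen best
    simp [pvDfs, pvUnionAll, PySem.List.combinations_zero]
  | succ k ihk =>
    intro pool
    induction pool with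
    | nil =>
      intro acc chosen best
      rw [pvDfs, pvDfsGo, PySem.List.combinations_nil_succ]
      simp
    | cons c pool ihp =>
      intro acc chosen best
      have hstepgo : pvDfs hit (k + 1) (c :: pool) acc chosen best
          = pvDfs hit (k + 1) pool acc chosen
              (pvDfs hit k pool (PySem.Set.union acc (hit.getD c PySem.Set.empty)) (chosen ++ [c]) best) := by
        rw [pvDfs, pvDfsGo, pvDfs]
      rw [hstepgo, ihp, ihk, PySem.List.combinations_cons_succ, List.foldl_append, List.foldl_map]
      congr 1
      apply PySem.List.foldl_congr_mem
      intro b rest _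
      have h1 : pvUnionAll hit (PySem.Set.union acc (hit.getD c PySem.Set.empty)) rest
          = pvUnionAll hit acc (c :: rest) := rfl
      rw [h1]
      simp

-- A's (min, argmin) fold and B's (argmin, min) fold are transposes of each other
theorem pvFold_swap (g : List Char → Int) :
    ∀ (l : List (List Char)) (m : Int) (b : Option (List Char)),
      l.foldl (fun st c => if g c < st.1 then (g c, some c) else st) (m, b)
        = ((l.foldl (fun st c => if g c < st.2 then (some c, g c) else st) (b, m)).2,
           (l.foldl (fun st c => if g c < st.2 then (some c, g c) else st) (b, m)).1) := by
  
  intro l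
  induction l with
  | nil => intro m b; simp
  | cons hd t ih =>
    intro m b
    simp only [List.foldl_cons]
    by_cases h : g hd < m
    · rw [if_pos h, if_pos h, ih]
    · rw [if_neg h, if_neg h, ih]

-- the two sort keys agree on every letter
theorem pvKey_eq (words : List String) :
    (fun x => -((pvCalcFreq words).getD x 0))
      = (fun c : Char => -((((pvHit words).getD c PySem.Set.empty).length : Int))) := by
  
  funext c
  rw [pvCalcFreq_getD, pvHit_getD words c, pvHitIdx, List.length_map,
    countP_eq_countP_range (fun w => decide (c ∈ w.toList)) words]

-- ===== VERDICT (by name: the statement is the Claim_ definition above) =====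
theorem find_min_excluded_letters_spec : Claim_equal_find_min_excluded_letters := by
  
  intro words all_letters _
  unfold Spec_find_min_excluded_letters
  simp only [find_min_excluded_letters, find_min_excluded_letters_alt]
  rw [pvKey_eq words]
  set L := PySem.List.sorted all_letters.toList
    (fun c => -((((pvHit words).getD c PySem.Set.empty).length : Int))) false with hL
  rw [pvRestA, pvGenA_eq_combinations, pvDfs_eq]
  have hg : (fun (st : Int × Option (List Char)) combo =>
        let excluded := (words.length : Int) - pvCountAvoided words combo
        if excluded < st.1 then (excluded, some combo) else st)
      = (fun (st : Int × Option (List Char)) combo =>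
        if ((pvUnionAll (pvHit words) PySem.Set.empty combo).length : Int) < st.1
        then (((pvUnionAll (pvHit words) PySem.Set.empty combo).length : Int), some combo) else st) := by
    funext st combo
    show (if (words.length : Int) - pvCountAvoided words combo < st.1
      then ((words.length : Int) - pvCountAvoided words combo, some combo) else st) = _
    rw [← pvUnionAll_length words combo]
  rw [hg, pvFold_swap (fun combo => ((pvUnionAll (pvHit words) PySem.Set.empty combo).length : Int))]
  have hfold : (PySem.List.combinations L 5).foldl
        (fun (st : Option (List Char) × Int) c =>
          if ((pvUnionAll (pvHit words) PySem.Set.empty c).length : Int) < st.2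
          then (some c, ((pvUnionAll (pvHit words) PySem.Set.empty c).length : Int)) else st)
        (none, (words.length : Int))
      = (PySem.List.combinations L 5).foldl
        (fun (best : Option (List Char) × Int) rest =>
          if ((pvUnionAll (pvHit words) PySem.Set.empty rest).length : Int) < best.2
          then (some ([] ++ rest), ((pvUnionAll (pvHit words) PySem.Set.empty rest).length : Int)) else best)
        (none, (words.length : Int)) := by
    apply PySem.List.foldl_congr_mem
    intro b rest _
    simp
  rw [hfold]
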